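-- pv_equiv track=rewrite | github.com/RaviKantGautam/codePractice | interviewQ.py | find_unique_frequency_range
-- ===== SOURCE A (Python) =====
-- def find_unique_frequency_range(nums):
--     '''
--     Given an array of integers nums, return the smallest range of integers k such that the frequency of each value in k is unique.
--     input: [1,6,2,2,3,2,4,3,3]
--     output: 2
--     '''
--     freq_dict = {}
--     max_count = 0
--     for num in nums:
--         freq_dict[num] = freq_dict.get(num, 0) + 1
--         if freq_dict[num] > max_count:
--             max_count = freq_dict[num]
--     return min({k for k, v in freq_dict.items() if v == max_count})
-- ===== SOURCE B (Python) =====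
-- def find_unique_frequency_range(nums):
--     # Single pass: select the best (count, smallest-key) candidate while counting,
--     # instead of counting, then filtering the max-count keys, then taking min.
--     freq = {}
--     best_count = 0
--     best_key = None
--     for num in nums:
--         c = freq.get(num, 0) + 1
--         freq[num] = c
--         if c > best_count or (c == best_count and num < best_key):
--             best_count = c
--             best_key = num
--     if best_key is None:
--         raise ValueError("empty nums")
--     return best_key
-- ===== Notes on version B (the rewrite author's own statement) =====
-- stated objective: alternative
-- what changed: B picks the answer in a single counting pass by maintaining the best (count, smallest-key) candidate, replacing A's separate max_count tracking plus set-comprehension filter plus min() over the candidate set.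
import Mathlib
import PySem

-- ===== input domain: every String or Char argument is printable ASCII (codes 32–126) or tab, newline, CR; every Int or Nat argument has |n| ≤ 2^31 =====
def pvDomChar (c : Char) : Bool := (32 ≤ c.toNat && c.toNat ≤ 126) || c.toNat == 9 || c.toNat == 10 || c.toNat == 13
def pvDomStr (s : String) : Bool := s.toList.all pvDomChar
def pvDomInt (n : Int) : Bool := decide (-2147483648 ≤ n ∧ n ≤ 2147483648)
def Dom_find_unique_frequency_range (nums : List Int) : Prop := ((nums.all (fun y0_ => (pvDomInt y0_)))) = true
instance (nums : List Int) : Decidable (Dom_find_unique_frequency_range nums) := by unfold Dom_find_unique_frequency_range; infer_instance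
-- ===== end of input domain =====

-- B replaces A's count-then-track-max-then-filter-then-min with a single counting pass
-- that keeps the best (count, smallest-key) candidate as it goes (objective: alternative).

-- ===== PORT A =====
-- loop body of A's 'for num in nums' (updates freq_dict and max_count)
def pvLoopA (st : PySem.Dict Int Int × Int) (num : Int) : PySem.Dict Int Int × Int :=
  let d := st.1.insert num (st.1.getD num 0 + 1)
  (d, if d.getD num 0 > st.2 then d.getD num 0 else st.2)

def find_unique_frequency_range (nums : List Int) : Int :=
  let st := nums.foldl pvLoopA (PySem.Dict.empty, 0)
  -- {k for k, v in freq_dict.items() if v == max_count}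
  let s : PySem.Set Int :=
    PySem.Set.ofList ((st.1.items.filter (fun p => p.2 == st.2)).map (fun p => p.1))
  -- min(s); the 'none' arm (empty set, Python ValueError) is excluded by Pre_
  match PySem.List.min? s (fun x => x) with
  | some v => v
  | none => 0

-- ===== PORT B =====
-- loop body of B's single pass: update freq, then the best (count, key) candidate;
-- the 'none' match arm is unreachable in Python (best_key is None only while best_count = 0 < c)
def pvLoopB (st : PySem.Dict Int Int × Int × Option Int) (num : Int) :
    PySem.Dict Int Int × Int × Option Int :=
  let c := st.1.getD num 0 + 1
  let d := st.1.insert num c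
  if c > st.2.1 || (c == st.2.1 &&
      (match st.2.2 with | some b => decide (num < b) | none => false))
  then (d, c, some num) else (d, st.2.1, st.2.2)

def find_unique_frequency_range_alt (nums : List Int) : Int :=
  let st := nums.foldl pvLoopB (PySem.Dict.empty, 0, none)
  -- best_key; the 'none' arm (empty nums, Python raises ValueError) is excluded by Pre_
  match st.2.2 with
  | some b => b
  | none => 0

-- ===== PRECONDITION & SPEC =====
-- Pre_ excludes only the empty list, on which both Pythons raise ValueError.
def Pre_find_unique_frequency_range (nums : List Int) : Prop := nums ≠ []
instance (nums : List Int) : Decidable (Pre_find_unique_frequency_range nums) := by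
  unfold Pre_find_unique_frequency_range; infer_instance

def pvWitness_find_unique_frequency_range : List Int := [1, 6, 2, 2, 3, 2, 4, 3, 3]

def Spec_find_unique_frequency_range (nums : List Int) (out : Int) : Prop :=
  out = find_unique_frequency_range_alt nums
instance (nums : List Int) (out : Int) : Decidable (Spec_find_unique_frequency_range nums out) := by
  unfold Spec_find_unique_frequency_range; infer_instance

-- ===== CLAIM (what is proved, stated in full; the proofs are below) =====
def Claim_equal_find_unique_frequency_range : Prop :=
  ∀ (nums : List Int), Dom_find_unique_frequency_range nums →
    Pre_find_unique_frequency_range nums →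
    Spec_find_unique_frequency_range nums (find_unique_frequency_range nums)

-- ===== LEMMAS AND PROOFS =====

-- invariant tying A's loop state (d, m) to B's (d, m, bk): m bounds every count,
-- and bk is the smallest key whose count equals m (none only for the empty dict).
def pvInv (d : PySem.Dict Int Int) (m : Int) (bk : Option Int) : Prop :=
  d.keys.Nodup ∧ (∀ p ∈ d.items, p.2 ≤ m) ∧
  ((bk = none ∧ d.items = [] ∧ m = 0) ∨
   (∃ b, bk = some b ∧ (b, m) ∈ d.items ∧ ∀ p ∈ d.items, p.2 = m → b ≤ p.1))

lemma pvStep (d : PySem.Dict Int Int) (m : Int) (bk : Option Int) (num : Int)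
    (h : pvInv d m bk) :
    ∃ b', pvLoopB (d, m, bk) num =
        ((pvLoopA (d, m) num).1, (pvLoopA (d, m) num).2, some b') ∧
      pvInv ((pvLoopA (d, m) num).1) ((pvLoopA (d, m) num).2) (some b') := by
  show ∃ b', pvLoopB (d, m, bk) num =
        (d.insert num (d.getD num 0 + 1), (pvLoopA (d, m) num).2, some b') ∧
      pvInv (d.insert num (d.getD num 0 + 1)) ((pvLoopA (d, m) num).2) (some b')
  unfold pvInv at h ⊢
  obtain ⟨hnd, hub, hcase⟩ := h
  have hnd' := PySem.Dict.nodup_keys_insert d num (d.getD num 0 + 1) hnd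
  have hA : (pvLoopA (d, m) num).2 = if d.getD num 0 + 1 > m then d.getD num 0 + 1 else m := by
    simp only [pvLoopA, PySem.Dict.getD_insert_self]
  rcases hcase with ⟨hbk, hit, hm⟩ | ⟨b, hbk, hbm, hmin⟩
  · -- empty dict: the first element always wins
    subst hbk; subst hm
    have hd : d = PySem.Dict.empty := PySem.Dict.ext (by rw [hit]; rfl)
    subst hd
    refine ⟨num, ?_, hnd', ?_, Or.inr ⟨num, rfl, ?_, ?_⟩⟩
    · simp [pvLoopB, hA, PySem.Dict.getD_empty]
    · intro p hp
      rcases (PySem.Dict.mem_items_insert _ num _ p).1 hp with rfl | ⟨hpold, _⟩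
      · simp [PySem.Dict.getD_empty, hA]
      · rw [show PySem.Dict.empty.items = ([] : List (Int × Int)) from rfl] at hpold
        cases hpold
    · simpa [PySem.Dict.getD_empty, hA] using
        PySem.Dict.mem_items_insert_self PySem.Dict.empty num 1
    · intro p hp _
      rcases (PySem.Dict.mem_items_insert _ num _ p).1 hp with rfl | ⟨hpold, _⟩
      · exact le_refl _
      · rw [show PySem.Dict.empty.items = ([] : List (Int × Int)) from rfl] at hpold
        cases hpold
  · subst hbk
    have hbval : d.getD b 0 = m := PySem.Dict.getD_of_mem_items d hbm hnd 0
    by_cases h1 : d.getD num 0 + 1 > m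
    · -- strictly new maximum: num wins
      refine ⟨num, ?_, hnd', ?_, Or.inr ⟨num, rfl, ?_, ?_⟩⟩
      · simp [pvLoopB, hA, h1]
      · intro p hp
        rcases (PySem.Dict.mem_items_insert _ num _ p).1 hp with rfl | ⟨hpold, _⟩
        · simp [hA, h1]
        · have := hub p hpold; simp [hA, h1]; omega
      · simpa [hA, h1] using PySem.Dict.mem_items_insert_self d num (d.getD num 0 + 1)
      · intro p hp hpm
        rcases (PySem.Dict.mem_items_insert _ num _ p).1 hp with rfl | ⟨hpold, _⟩
        · exact le_refl _
        · have := hub p hpold; simp [hA, h1] at hpm; omega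
    · have hbnum : b ≠ num := by
        intro e; subst e; rw [hbval] at h1; omega
      by_cases h2 : d.getD num 0 + 1 = m
      · -- num ties the maximum: smaller key wins
        by_cases h3 : num < b
        · refine ⟨num, ?_, hnd', ?_, Or.inr ⟨num, rfl, ?_, ?_⟩⟩
          · simp [pvLoopB, hA, h2, h3]
          · intro p hp
            rcases (PySem.Dict.mem_items_insert _ num _ p).1 hp with rfl | ⟨hpold, _⟩
            · simp [hA, h1]; omega
            · have := hub p hpold; simp [hA, h1]; omega
          · rw [hA, if_neg h1, ← h2]
            exact PySem.Dict.mem_items_insert_self d num (d.getD num 0 + 1)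
          · intro p hp hpm
            rcases (PySem.Dict.mem_items_insert _ num _ p).1 hp with rfl | ⟨hpold, _⟩
            · exact le_refl _
            · simp [hA, h1] at hpm; exact le_of_lt (lt_of_lt_of_le h3 (hmin p hpold hpm))
        · refine ⟨b, ?_, hnd', ?_, Or.inr ⟨b, rfl, ?_, ?_⟩⟩
          · simp [pvLoopB, hA, h2, h3]
          · intro p hp
            rcases (PySem.Dict.mem_items_insert _ num _ p).1 hp with rfl | ⟨hpold, _⟩
            · simp [hA, h1]; omega
            · have := hub p hpold; simp [hA, h1]; omega
          · exact (by simpa [hA, h1] using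
              (PySem.Dict.mem_items_insert d num _ (b, m)).2 (Or.inr ⟨hbm, hbnum⟩))
          · intro p hp hpm
            rcases (PySem.Dict.mem_items_insert _ num _ p).1 hp with rfl | ⟨hpold, _⟩
            · omega
            · simp [hA, h1] at hpm; exact hmin p hpold hpm
      · -- num stays below the maximum
        refine ⟨b, ?_, hnd', ?_, Or.inr ⟨b, rfl, ?_, ?_⟩⟩
        · simp [pvLoopB, hA, h1, h2]
        · intro p hp
          rcases (PySem.Dict.mem_items_insert _ num _ p).1 hp with rfl | ⟨hpold, _⟩
          · simp [hA, h1]; omega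
          · have := hub p hpold; simp [hA, h1]; omega
        · exact (by simpa [hA, h1] using
            (PySem.Dict.mem_items_insert d num _ (b, m)).2 (Or.inr ⟨hbm, hbnum⟩))
        · intro p hp hpm
          rcases (PySem.Dict.mem_items_insert _ num _ p).1 hp with rfl | ⟨hpold, _⟩
          · simp [hA, h1] at hpm; omega
          · simp [hA, h1] at hpm; exact hmin p hpold hpm


lemma pvFold (l : List Int) (d : PySem.Dict Int Int) (m : Int) (bk : Option Int)
    (h : pvInv d m bk) :
    (l.foldl pvLoopA (d, m)).1 = (l.foldl pvLoopB (d, m, bk)).1 ∧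
    (l.foldl pvLoopA (d, m)).2 = (l.foldl pvLoopB (d, m, bk)).2.1 ∧
    pvInv (l.foldl pvLoopB (d, m, bk)).1 (l.foldl pvLoopB (d, m, bk)).2.1
      (l.foldl pvLoopB (d, m, bk)).2.2 ∧
    ((l ≠ [] ∨ bk.isSome) → ((l.foldl pvLoopB (d, m, bk)).2.2).isSome) := by
  induction l generalizing d m bk with
  | nil =>
    refine ⟨rfl, rfl, h, ?_⟩
    rintro (hne | hs)
    · exact absurd rfl hne
    · exact hs
  | cons x l ih =>
    obtain ⟨b', hB, hInv⟩ := pvStep d m bk x h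
    simp only [List.foldl_cons, hB]
    have := ih ((pvLoopA (d, m) x).1) ((pvLoopA (d, m) x).2) (some b') hInv
    refine ⟨this.1, this.2.1, this.2.2.1, fun _ => this.2.2.2 ?_⟩
    by_cases hl : l = []
    · right; simp
    · left; exact hl

lemma pvExtract (d : PySem.Dict Int Int) (m : Int) (b : Int) (h : pvInv d m (some b)) :
    PySem.List.min?
      (PySem.Set.ofList ((d.items.filter (fun p => p.2 == m)).map (fun p => p.1)))
      (fun x => x) = some b := by
  obtain ⟨hnd, hub, hcase⟩ := h
  rcases hcase with ⟨hnone, _⟩ | ⟨b', hb', hbm, hmin⟩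
  · exact absurd hnone (by simp)
  · have hbb : b = b' := Option.some.inj hb'
    subst hbb
    set xs := PySem.Set.ofList ((d.items.filter (fun p => p.2 == m)).map (fun p => p.1)) with hxs
    have hmemxs : ∀ y, y ∈ xs ↔ ∃ p ∈ d.items, p.2 = m ∧ y = p.1 := by
      intro y
      simp only [hxs, PySem.Set.mem_ofList, List.mem_map, List.mem_filter, beq_iff_eq]
      constructor
      · rintro ⟨a, ⟨hm1, hm2⟩, hy⟩; exact ⟨a, hm1, hm2, hy.symm⟩
      · rintro ⟨a, hm1, hm2, hy⟩; exact ⟨a, ⟨hm1, hm2⟩, hy.symm⟩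
    have hb_in : b ∈ xs := (hmemxs b).2 ⟨(b, m), hbm, rfl, rfl⟩
    cases hmv : PySem.List.min? xs (fun x => x) with
    | none =>
      have := (PySem.List.min?_eq_none_iff (xs := xs) (key := fun x => x)).mp hmv
      exact absurd this (List.ne_nil_of_mem hb_in)
    | some v =>
      have hvxs := PySem.List.min?_mem hmv
      have hvb : v ≤ b := PySem.List.min?_isMin hmv b hb_in
      obtain ⟨p, hp, hpm, hvp⟩ := (hmemxs v).1 hvxs
      have hbv : b ≤ v := hvp ▸ hmin p hp hpm
      exact congrArg some (le_antisymm hvb hbv)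


-- ===== VERDICT (by name: the statement is the Claim_ definition above) =====
theorem find_unique_frequency_range_spec : Claim_equal_find_unique_frequency_range := by
  intro nums _ hpre
  unfold Spec_find_unique_frequency_range
  unfold find_unique_frequency_range find_unique_frequency_range_alt
  have h0 : pvInv PySem.Dict.empty 0 none := by
    unfold pvInv
    refine ⟨by simp, ?_, Or.inl ⟨rfl, rfl, rfl⟩⟩
    intro p hp
    rw [show PySem.Dict.empty.items = ([] : List (Int × Int)) from rfl] at hp
    cases hp
  obtain ⟨h1, h2, h3, h4⟩ := pvFold nums PySem.Dict.empty 0 none h0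
  obtain ⟨b, hb⟩ := Option.isSome_iff_exists.mp (h4 (Or.inl hpre))
  rw [hb] at h3
  have hmin := pvExtract _ _ _ h3
  simp only [h1, h2, hb, hmin]
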